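-- pv_equiv track=rewrite | github.com/mbolivar/zmp-build | zephyr_mergeup.py | shortlog_area_prefix
-- ===== SOURCE A (Python) =====
-- def shortlog_is_revert(shortlog):
--     return shortlog.startswith('Revert ')
--
-- def shortlog_reverts_what(shortlog):
--     revert = 'Revert '
--     return shortlog[len(revert):].strip('"')
--
-- def shortlog_area_prefix(shortlog):
--     '''Get the prefix of a shortlog which describes its area.
--
--     This returns the "raw" prefix as it appears in the shortlog. To
--     canonicalize this to one of a known set of areas, use
--     shortlog_area() instead. If no prefix is present, returns None.
--     '''
--     # Base case for recursion.
--     if not shortlog: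
--         return None
--
--     # 'Revert "foo"' should map to foo's area prefix.
--     if shortlog_is_revert(shortlog):
--         shortlog = shortlog_reverts_what(shortlog)
--         return shortlog_area_prefix(shortlog)
--
--     # If there is no ':', there is no area. Otherwise, the candidate
--     # area is the substring up to the first ':'.
--     if ':' not in shortlog:
--         return None
--     area, rest = [s.strip() for s in shortlog.split(':', 1)]
--
--     # subsys: foo should map to foo's area prefix, etc.
--     if area in ['subsys', 'include']:
--         return shortlog_area_prefix(rest)
--
--     return area
-- ===== SOURCE B (Python) =====
-- def shortlog_area_prefix(shortlog):
--     '''Get the prefix of a shortlog which describes its area.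
--
--     Iterative version: one while-loop over the current string, locating
--     the first colon with find() and slicing, instead of recursion + split.
--     '''
--     s = shortlog
--     while True:
--         if s.startswith('Revert '):
--             s = s[len('Revert '):].strip('"')
--             continue
--         i = s.find(':')
--         if i < 0:
--             return None
--         area = s[:i].strip()
--         if area in ('subsys', 'include'):
--             s = s[i + 1:].strip()
--             continue
--         return area
-- ===== Notes on version B (the rewrite author's own statement) =====
-- stated objective: simpler
-- what changed: Replaces the three-function recursion over split(sep,1) with a single iterative while-loop that locates the first colon via find() and slices the string directly; no helper functions, no list comprehension, no explicit empty-string base case.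
import Mathlib
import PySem

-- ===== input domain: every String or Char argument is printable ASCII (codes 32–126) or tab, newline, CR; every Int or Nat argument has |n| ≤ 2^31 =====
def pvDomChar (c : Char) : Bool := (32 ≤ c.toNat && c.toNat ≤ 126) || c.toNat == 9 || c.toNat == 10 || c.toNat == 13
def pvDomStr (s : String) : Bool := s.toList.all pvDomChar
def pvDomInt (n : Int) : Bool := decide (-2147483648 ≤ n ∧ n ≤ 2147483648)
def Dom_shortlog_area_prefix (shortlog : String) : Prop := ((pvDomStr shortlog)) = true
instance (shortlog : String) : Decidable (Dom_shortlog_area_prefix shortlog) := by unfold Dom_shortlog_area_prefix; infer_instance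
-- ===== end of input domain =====

-- B replaces A's three-function recursion over split with a single while-loop
-- using find() and slices (objective: simpler); return values agree on every input.


-- ===== PORT A =====
def shortlog_is_revert (shortlog : String) : Bool :=
  PySem.Str.startswith shortlog "Revert "

def shortlog_reverts_what (shortlog : String) : String :=
  PySem.Str.stripChars (PySem.Str.slice shortlog (some 7) none) "\""

-- A's recursion; each recursive call is on a strictly shorter string, so fuel
-- `length + 1` is never exhausted (the 0 case is a totality guard only).
def shortlogAreaRecA : Nat → String → Option String
  | 0, _ => none
  | fuel + 1, s =>
    if s = "" then none
    else if shortlog_is_revert s then shortlogAreaRecA fuel (shortlog_reverts_what s)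
    else if PySem.Str.isIn ":" s = false then none
    else
      match PySem.Str.splitMax? s ":" 1 with
      | some [a, r] =>
        let area := PySem.Str.strip a
        let rest := PySem.Str.strip r
        if ["subsys", "include"].contains area then shortlogAreaRecA fuel rest
        else some area
      | _ => none

def shortlog_area_prefix (shortlog : String) : Option String :=
  shortlogAreaRecA (shortlog.length + 1) shortlog

-- ===== PORT B =====
-- B's while-loop over the current string, as a tail recursion on List Char;
-- fuel `length + 1` is never exhausted (each round shortens the string).
def shortlogAreaLoopB : Nat → List Char → Option String
  | 0, _ => none
  | fuel + 1, s =>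
    if PySem.Chars.startswith s "Revert ".toList then
      shortlogAreaLoopB fuel (PySem.Chars.stripChars (PySem.List.slice s (some 7) none) ['"'])
    else
      let i := PySem.Chars.find s [':']
      if i < 0 then none
      else
        let area := PySem.Chars.strip (PySem.List.slice s none (some i))
        if area == "subsys".toList || area == "include".toList then
          shortlogAreaLoopB fuel (PySem.Chars.strip (PySem.List.slice s (some (i + 1)) none))
        else some (String.ofList area)

def shortlog_area_prefix_alt (shortlog : String) : Option String :=
  shortlogAreaLoopB (shortlog.toList.length + 1) shortlog.toList

-- ===== PRECONDITION & SPEC =====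
def Spec_shortlog_area_prefix (shortlog : String) (out : Option String) : Prop := out = shortlog_area_prefix_alt shortlog
instance (shortlog : String) (out : Option String) : Decidable (Spec_shortlog_area_prefix shortlog out) := by unfold Spec_shortlog_area_prefix; infer_instance

-- ===== CLAIM (what is proved, stated in full; the proofs are below) =====
def Claim_equal_shortlog_area_prefix : Prop := ∀ (shortlog : String), Dom_shortlog_area_prefix shortlog → Spec_shortlog_area_prefix shortlog (shortlog_area_prefix shortlog)

-- ===== LEMMAS AND PROOFS =====

-- find.go on a single-character needle
theorem find_go_single (c : Char) : ∀ (l : List Char) (k : Nat),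
    PySem.Chars.find.go [c] l k =
      if c ∈ l then ((k : Int) + (l.takeWhile (· ≠ c)).length) else -1 := by
  intro l
  induction l with
  | nil => intro k; simp [PySem.Chars.find.go]
  | cons a t ih =>
    intro k
    by_cases hac : c = a
    · subst hac
      simp [PySem.Chars.find.go, List.isPrefixOf, List.takeWhile]
    · have hpre : ([c].isPrefixOf (a :: t)) = false := by
        simpa [List.isPrefixOf] using hac
      simp only [PySem.Chars.find.go, hpre, Bool.false_eq_true, if_false, ih]
      by_cases hmem : c ∈ t
      · simp [hmem, List.takeWhile, hac, Ne.symm hac]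
        ring
      · simp [hmem, hac]

theorem find_single (c : Char) (l : List Char) :
    PySem.Chars.find l [c] =
      if c ∈ l then ((l.takeWhile (· ≠ c)).length : Int) else -1 := by
  simpa using find_go_single c l 0

-- splitOnMax.go with maxsplit 1 on a single-char separator that occurs in l
theorem splitOnMax_go_one (c : Char) : ∀ (l : List Char) (fuel : Nat) (cur : List Char)
    (acc : List (List Char)), l.length < fuel → c ∈ l →
    PySem.Chars.splitOnMax.go [c] fuel 1 l cur acc =
      acc.reverse ++ [cur.reverse ++ l.takeWhile (· ≠ c), (l.dropWhile (· ≠ c)).tail] := by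
  intro l
  induction l with
  | nil => intro fuel cur acc _ hmem; simp at hmem
  | cons a t ih =>
    intro fuel cur acc hfuel hmem
    match fuel, hfuel with
    | fuel + 1, hfuel =>
      by_cases hac : c = a
      · subst hac
        have hpre : ([c].isPrefixOf (c :: t)) = true := by simp [List.isPrefixOf]
        have h0 : PySem.Chars.splitOnMax.go [c] fuel 0 t [] (cur.reverse :: acc) =
            (t :: cur.reverse :: acc).reverse := by
          match fuel, t with
          | 0, _ => simp [PySem.Chars.splitOnMax.go]
          | f + 1, [] => simp [PySem.Chars.splitOnMax.go]
          | f + 1, x :: xs => simp [PySem.Chars.splitOnMax.go]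
        simp only [PySem.Chars.splitOnMax.go, hpre, if_true]
        rw [if_neg (by decide : ¬ (1 : Nat) = 0)]
        have hd : List.drop ([c].length) (c :: t) = t := by simp
        have h1 : (1 : Nat) - 1 = 0 := rfl
        rw [h1, hd, h0]
        simp [List.takeWhile, List.dropWhile]
      · have hpre : ([c].isPrefixOf (a :: t)) = false := by
          simpa [List.isPrefixOf] using hac
        have hmt : c ∈ t := by cases hmem with
          | head => exact (hac rfl).elim
          | tail _ h => exact h
        simp only [PySem.Chars.splitOnMax.go, hpre, Bool.false_eq_true, if_false,
          if_neg (by decide : ¬ (1 : Nat) = 0)]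
        rw [ih fuel (a :: cur) acc (Nat.lt_of_succ_lt_succ hfuel) hmt]
        simp [List.takeWhile, List.dropWhile, Ne.symm hac]

-- The single step of A's split equals take/drop at the first ':' position.
theorem splitMax_char (c : Char) (l : List Char) (hmem : c ∈ l) :
    PySem.Chars.splitOnMax l [c] 1 =
      [l.takeWhile (· ≠ c), (l.dropWhile (· ≠ c)).tail] := by
  unfold PySem.Chars.splitOnMax
  rw [if_neg (by decide)]
  rw [show (1 : Int).toNat = 1 from rfl]
  rw [splitOnMax_go_one c l (l.length + 1) [] [] (Nat.lt_succ_self _) hmem]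
  simp

theorem dropWhile_tail_eq_drop (c : Char) (l : List Char) :
    (l.dropWhile (· ≠ c)).tail = l.drop ((l.takeWhile (· ≠ c)).length + 1) := by
  induction l with
  | nil => simp
  | cons a t ih =>
    by_cases hac : a = c
    · subst hac; simp [List.dropWhile, List.takeWhile]
    · have h' : decide (a ≠ c) = true := by simpa using hac
      simp only [List.dropWhile_cons, List.takeWhile_cons, h', if_true, List.length_cons,
        List.drop_succ_cons]
      exact ih

-- One fuel-indexed loop equals the other.
set_option maxHeartbeats 2000000 in
theorem loop_eq : ∀ (fuel : Nat) (s : String),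
    shortlogAreaRecA fuel s = shortlogAreaLoopB fuel s.toList := by
  intro fuel
  induction fuel with
  | zero => intro s; rfl
  | succ fuel ih =>
    intro s
    by_cases hs : s = ""
    · subst hs
      have h1 : PySem.Chars.startswith [] ['R','e','v','e','r','t',' '] = false := by decide
      have h2 : PySem.Chars.find [] [':'] = -1 := by decide
      simp [shortlogAreaRecA, shortlogAreaLoopB, h1, h2]
    · by_cases hr : shortlog_is_revert s = true
      · have hr' : PySem.Chars.startswith s.toList "Revert ".toList = true := by
          simpa [shortlog_is_revert, PySem.Str.startswith] using hr
        have harg : (shortlog_reverts_what s).toList =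
            PySem.Chars.stripChars (PySem.List.slice s.toList (some 7) none) ['"'] := by
          simp [shortlog_reverts_what, PySem.Str.toList_stripChars, PySem.Str.toList_slice]
        simp only [shortlogAreaRecA, shortlogAreaLoopB, if_neg hs, if_pos hr, if_pos hr']
        rw [ih, harg]
      · have hr' : PySem.Chars.startswith s.toList "Revert ".toList = false := by
          simpa [shortlog_is_revert, PySem.Str.startswith] using hr
        have hnr : ¬ PySem.Chars.startswith s.toList "Revert ".toList = true := by
          rw [hr']; simp
        simp only [shortlogAreaRecA, shortlogAreaLoopB, if_neg hs, if_neg hr, if_neg hnr]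
        by_cases hc : ':' ∈ s.toList
        · -- ':' occurs: both sides split at the first ':'
          have hfind : PySem.Chars.find s.toList [':'] =
              ((s.toList.takeWhile (· ≠ ':')).length : Int) := by
            rw [find_single]; simp [hc]
          have hisIn : PySem.Chars.isIn [':'] s.toList = true := by
            simp [PySem.Chars.isIn, hfind]
          have hsplit : PySem.Str.splitMax? s ":" 1 =
              some [String.ofList (s.toList.takeWhile (· ≠ ':')),
                    String.ofList ((s.toList.dropWhile (· ≠ ':')).tail)] := by
            simp only [PySem.Str.splitMax?, PySem.Chars.splitMax?]
            rw [if_neg (by decide)]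
            rw [show ":".toList = [':'] from rfl, splitMax_char ':' s.toList hc]
            rfl
          have htake : PySem.List.slice s.toList none
              (some ((s.toList.takeWhile (· ≠ ':')).length : Int)) =
              s.toList.takeWhile (· ≠ ':') := by
            rw [PySem.List.slice_to s.toList (by positivity)]
            simp only [Int.toNat_natCast]
            exact (List.prefix_iff_eq_take.mp (List.takeWhile_prefix _)).symm
          have hdrop : PySem.List.slice s.toList
              (some (((s.toList.takeWhile (· ≠ ':')).length : Int) + 1)) none =
              (s.toList.dropWhile (· ≠ ':')).tail := by
            rw [PySem.List.slice_from s.toList (by positivity), dropWhile_tail_eq_drop]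
            congr 1
          have harea : (PySem.Str.strip (String.ofList (s.toList.takeWhile (· ≠ ':')))).toList =
              PySem.Chars.strip (s.toList.takeWhile (· ≠ ':')) := by
            rw [PySem.Str.toList_strip, String.toList_ofList]
          have hrest : (PySem.Str.strip (String.ofList ((s.toList.dropWhile (· ≠ ':')).tail))).toList =
              PySem.Chars.strip ((s.toList.dropWhile (· ≠ ':')).tail) := by
            rw [PySem.Str.toList_strip, String.toList_ofList]
          rw [if_neg (by simp [hisIn])]
          simp only [hsplit]
          rw [hfind,
            if_neg (by omega : ¬ ((s.toList.takeWhile (· ≠ ':')).length : Int) < 0),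
            htake, hdrop]
          have hiff : (["subsys", "include"].contains
              (PySem.Str.strip (String.ofList (s.toList.takeWhile (· ≠ ':')))) = true) ↔
              (PySem.Chars.strip (s.toList.takeWhile (· ≠ ':')) = "subsys".toList ∨
               PySem.Chars.strip (s.toList.takeWhile (· ≠ ':')) = "include".toList) := by
            rw [List.contains_cons, List.contains_cons, List.contains_nil]
            simp only [Bool.or_false, Bool.or_eq_true, beq_iff_eq]
            constructor
            · rintro (h | h)
              · exact Or.inl (by rw [← harea, h])
              · exact Or.inr (by rw [← harea, h])
            · rintro (h | h)
              · exact Or.inl (String.toList_inj.mp (by rw [harea, h]))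
              · exact Or.inr (String.toList_inj.mp (by rw [harea, h]))
          by_cases hin : PySem.Chars.strip (s.toList.takeWhile (· ≠ ':')) = "subsys".toList ∨
              PySem.Chars.strip (s.toList.takeWhile (· ≠ ':')) = "include".toList
          · have hinB : (PySem.Chars.strip (s.toList.takeWhile (· ≠ ':')) == "subsys".toList ||
                PySem.Chars.strip (s.toList.takeWhile (· ≠ ':')) == "include".toList) = true := by
              simpa using hin
            rw [if_pos (hiff.mpr hin), if_pos hinB, ih, hrest]
          · have hinA := Bool.eq_false_iff.mpr (fun hh => hin (hiff.mp hh))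
            have hinB : (PySem.Chars.strip (s.toList.takeWhile (· ≠ ':')) == "subsys".toList ||
                PySem.Chars.strip (s.toList.takeWhile (· ≠ ':')) == "include".toList) = false := by
              simp only [Bool.or_eq_false_iff, beq_eq_false_iff_ne]
              exact ⟨fun h => hin (Or.inl h), fun h => hin (Or.inr h)⟩
            rw [if_neg (fun hh => absurd (hinA ▸ hh) (by decide)),
              if_neg (fun hh => absurd (hinB ▸ hh) (by decide))]
            exact congrArg some (String.toList_inj.mp (by rw [harea, String.toList_ofList]))
        · -- no ':' anywhere: both return none
          have hfind : PySem.Chars.find s.toList [':'] = -1 := by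
            rw [find_single]; simp [hc]
          have hisIn : PySem.Chars.isIn [':'] s.toList = false := by
            simp [PySem.Chars.isIn, hfind]
          rw [if_pos (by simp [PySem.Str.isIn, hisIn] : PySem.Str.isIn ":" s = false), hfind,
            if_pos (by decide : (-1 : Int) < 0)]

-- ===== VERDICT (by name: the statement is the Claim_ definition above) =====
theorem shortlog_area_prefix_spec : Claim_equal_shortlog_area_prefix := by
  intro s _
  unfold Spec_shortlog_area_prefix shortlog_area_prefix shortlog_area_prefix_alt
  rw [loop_eq]
  simp
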